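-- pv_equiv track=rewrite | github.com/kevroy314/hiit | hiit/utils.py | get_field_group
-- ===== SOURCE A (Python) =====
-- def get_field_group(field_name):
--     """Return the group name for a field."""
--     field_lower = field_name.lower()
--     if any(speed in field_lower for speed in ['enhanced_speed', 'vertical_speed', 'speed']):
--         return 'Speeds'
--     elif any(pos in field_lower for pos in ['distance', 'position_lat', 'position_lon']):
--         return 'Positions'
--     elif any(alt in field_lower for alt in ['altitude', 'enhanced_altitude']):
--         return 'Altitudes'
--     elif 'temperature' in field_lower:
--         return 'Temperature'
--     elif 'heart_rate' in field_lower: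
--         return 'Heart Rate'
--     else:
--         return 'Other'
-- ===== SOURCE B (Python) =====
-- # Minimal-pattern classifier: substring-subsumed patterns are dropped
-- # ('enhanced_speed' and 'vertical_speed' contain 'speed', 'enhanced_altitude'
-- # contains 'altitude'), and the group is chosen as the minimum-precedence
-- # index among ALL matching rules, not by a first-match branch chain.
-- RULES = [
--     ('speed', 'Speeds'),
--     ('distance', 'Positions'),
--     ('position_lat', 'Positions'),
--     ('position_lon', 'Positions'),
--     ('altitude', 'Altitudes'),
--     ('temperature', 'Temperature'),
--     ('heart_rate', 'Heart Rate'),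
-- ]
--
-- def get_field_group(field_name):
--     """Return the group name for a field."""
--     low = field_name.lower()
--     hits = [i for i, (pat, _) in enumerate(RULES) if pat in low]
--     return RULES[min(hits)][1] if hits else 'Other'
-- ===== Notes on version B (the rewrite author's own statement) =====
-- stated objective: simpler
-- what changed: B drops the substring-subsumed patterns (enhanced_speed/vertical_speed contain speed, enhanced_altitude contains altitude), collects ALL matching rules from one flat minimal pattern list, and returns the group of the minimum-precedence match, instead of A's ordered if/elif chain of any() membership tests.
import Mathlib
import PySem

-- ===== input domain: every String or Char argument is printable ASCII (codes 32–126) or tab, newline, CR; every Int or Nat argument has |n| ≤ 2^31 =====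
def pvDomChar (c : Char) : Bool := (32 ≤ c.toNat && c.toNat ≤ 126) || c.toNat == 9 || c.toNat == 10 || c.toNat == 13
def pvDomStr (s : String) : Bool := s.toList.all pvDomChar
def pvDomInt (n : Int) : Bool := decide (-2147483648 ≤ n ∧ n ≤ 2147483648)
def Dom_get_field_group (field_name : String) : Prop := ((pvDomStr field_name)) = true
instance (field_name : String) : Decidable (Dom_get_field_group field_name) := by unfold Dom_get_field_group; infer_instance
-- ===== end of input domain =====

-- B replaces A's if/elif chain by a minimal flat pattern list (substring-subsumed patterns dropped)
-- and picks the minimum-precedence index among ALL hits (objective: simpler).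


-- ===== PORT A =====
def get_field_group (field_name : String) : String :=
  let field_lower := PySem.Str.lower field_name
  if (["enhanced_speed", "vertical_speed", "speed"]).any (fun speed => PySem.Str.isIn speed field_lower) then
    "Speeds"
  else if (["distance", "position_lat", "position_lon"]).any (fun pos => PySem.Str.isIn pos field_lower) then
    "Positions"
  else if (["altitude", "enhanced_altitude"]).any (fun alt => PySem.Str.isIn alt field_lower) then
    "Altitudes"
  else if PySem.Str.isIn "temperature" field_lower then
    "Temperature"
  else if PySem.Str.isIn "heart_rate" field_lower then
    "Heart Rate"
  else
    "Other"

-- ===== PORT B =====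
def RULES : List (String × String) :=
  [ ("speed", "Speeds"),
    ("distance", "Positions"),
    ("position_lat", "Positions"),
    ("position_lon", "Positions"),
    ("altitude", "Altitudes"),
    ("temperature", "Temperature"),
    ("heart_rate", "Heart Rate") ]

def get_field_group_alt (field_name : String) : String :=
  let low := PySem.Str.lower field_name
  let hits :=
    ((PySem.List.enumerate RULES).filter (fun p => PySem.Str.isIn p.2.1 low)).map (fun p => p.1)
  match PySem.List.min? hits (fun i => i) with
  | some i => ((PySem.List.pyGet? RULES i).getD ("", "Other")).2
  | none => "Other"

-- ===== PRECONDITION & SPEC =====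
def Spec_get_field_group (field_name : String) (out : String) : Prop := out = get_field_group_alt field_name
instance (field_name : String) (out : String) : Decidable (Spec_get_field_group field_name out) := by unfold Spec_get_field_group; infer_instance

-- ===== CLAIM (what is proved, stated in full; the proofs are below) =====
def Claim_equal_get_field_group : Prop := ∀ (field_name : String), Dom_get_field_group field_name → Spec_get_field_group field_name (get_field_group field_name)

-- ===== LEMMAS AND PROOFS =====

-- substring transitivity: if b occurs in s and a occurs in b, then a occurs in s
theorem isIn_of_isIn_of_infix {a b : String} (s : String)
    (hab : a.toList <:+: b.toList) (h : PySem.Str.isIn b s = true) :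
    PySem.Str.isIn a s = true := by
  rw [PySem.Str.isIn_iff_infix] at *
  exact hab.trans h

-- ===== VERDICT (by name: the statement is the Claim_ definition above) =====
set_option maxHeartbeats 4000000 in
theorem get_field_group_spec : Claim_equal_get_field_group := by
  intro fn _
  unfold Spec_get_field_group get_field_group get_field_group_alt RULES
  set low := PySem.Str.lower fn with hlow
  have hes : PySem.Str.isIn "enhanced_speed" low = true → PySem.Str.isIn "speed" low = true :=
    isIn_of_isIn_of_infix low (by decide)
  have hvs : PySem.Str.isIn "vertical_speed" low = true → PySem.Str.isIn "speed" low = true :=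
    isIn_of_isIn_of_infix low (by decide)
  have hea : PySem.Str.isIn "enhanced_altitude" low = true → PySem.Str.isIn "altitude" low = true :=
    isIn_of_isIn_of_infix low (by decide)
  cases h1 : PySem.Str.isIn "speed" low <;>
  cases h2 : PySem.Str.isIn "distance" low <;>
  cases h3 : PySem.Str.isIn "position_lat" low <;>
  cases h4 : PySem.Str.isIn "position_lon" low <;>
  cases h5 : PySem.Str.isIn "altitude" low <;>
  cases h6 : PySem.Str.isIn "temperature" low <;>
  cases h7 : PySem.Str.isIn "heart_rate" low <;>
  simp_all [PySem.List.enumerate, PySem.List.min?, PySem.List.pyGet?, PySem.List.pyIdx?,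
    List.filter, List.any]
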